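-- pv_equiv track=rewrite | github.com/yaokunkun/Weld-GPT_demo | app/utils/query_process.py | determine_single_welding_intent
-- ===== SOURCE A (Python) =====
-- def determine_single_welding_intent(slots):
--     """
--     根据token_output中识别的实体确定单一的焊接意图。
--     实体可能是THI（焊接厚度）、MET（焊接方法）和MAT（焊接材料）。
--     函数将返回一个字符串，表示最匹配的查询意图。
--     """
--
--     # 标记实体的存在
--     has_thi, has_met, has_mat = False, False, False
--
--     # 遍历实体并更新标记
--     if isinstance(slots, list):
--         for slot in slots:
--             if slot[0] == 'THI':
--                 has_thi = True
--             elif slot[0] == 'MET':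
--                 has_met = True
--             elif slot[0] == 'MAT':
--                 has_mat = True
--     elif isinstance(slots, dict):
--         for key in slots:
--             if key == 'THI':
--                 has_thi = True
--             elif key == 'MET':
--                 has_met = True
--             elif key == 'MAT':
--                 has_mat = True
--     else:
--         raise TypeError(f"slots must be list or dict, rather than {type(slots)}")
--
--     # 根据实体的组合确定单一的查询意图
--     if has_thi and has_met and has_mat:
--         return 'QUERY_7'
--     elif has_thi and has_met:
--         return 'QUERY_4'
--     elif has_thi and has_mat:
--         return 'QUERY_5'
--     elif has_met and has_mat:
--         return 'QUERY_6'
--     elif has_thi: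
--         return 'QUERY_1'
--     elif has_met:
--         return 'QUERY_2'
--     elif has_mat:
--         return 'QUERY_3'
--     else:
--         return 'OTHER'
-- ===== SOURCE B (Python) =====
-- _INTENT_TABLE = ['OTHER', 'QUERY_3', 'QUERY_2', 'QUERY_6',
--                  'QUERY_1', 'QUERY_5', 'QUERY_4', 'QUERY_7']
--
-- def determine_single_welding_intent(slots):
--     if isinstance(slots, list):
--         tags = {slot[0] for slot in slots}
--     elif isinstance(slots, dict):
--         tags = set(slots)
--     else:
--         raise TypeError(f"slots must be list or dict, rather than {type(slots)}")
--     code = 4 * ('THI' in tags) + 2 * ('MET' in tags) + ('MAT' in tags)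
--     return _INTENT_TABLE[code]
-- ===== Notes on version B (the rewrite author's own statement) =====
-- stated objective: simpler
-- what changed: Replaces the three boolean flags plus 7-way if-elif cascade with a set of seen tags, a 3-bit code 4*has_thi+2*has_met+has_mat, and a single lookup in an 8-entry table.
-- outside the precondition, e.g. on determine_single_welding_intent([[]]): A raises IndexError, B raises IndexError
import Mathlib
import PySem

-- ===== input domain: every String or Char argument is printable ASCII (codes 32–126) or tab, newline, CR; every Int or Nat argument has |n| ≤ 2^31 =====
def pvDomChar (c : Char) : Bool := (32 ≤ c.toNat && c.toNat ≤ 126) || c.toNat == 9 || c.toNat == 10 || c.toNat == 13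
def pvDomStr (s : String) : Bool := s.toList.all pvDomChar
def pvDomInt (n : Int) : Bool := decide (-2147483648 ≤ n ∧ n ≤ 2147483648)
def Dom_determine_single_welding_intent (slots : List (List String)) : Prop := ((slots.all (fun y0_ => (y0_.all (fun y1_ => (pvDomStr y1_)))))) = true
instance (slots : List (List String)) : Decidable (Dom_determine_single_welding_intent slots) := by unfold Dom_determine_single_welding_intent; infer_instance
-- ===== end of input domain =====

-- B replaces A's three boolean flags and 7-way if-elif cascade by a set of seen tags,
-- a 3-bit code and one lookup in an 8-entry table (objective: simpler).

-- ===== PORT A =====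
-- loop over slots updating the three flags; slot[0] is exact under Pre_ (slot ≠ [])
def detA_flags : List (List String) → Bool × Bool × Bool → Bool × Bool × Bool
  | [], st => st
  | slot :: rest, (t, m, a) =>
    let h := (PySem.List.pyGet? slot 0).getD ""
    if h == "THI" then detA_flags rest (true, m, a)
    else if h == "MET" then detA_flags rest (t, true, a)
    else if h == "MAT" then detA_flags rest (t, m, true)
    else detA_flags rest (t, m, a)

def determine_single_welding_intent (slots : List (List String)) : String :=
  match detA_flags slots (false, false, false) with
  | (has_thi, has_met, has_mat) =>
    if has_thi && has_met && has_mat then "QUERY_7"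
    else if has_thi && has_met then "QUERY_4"
    else if has_thi && has_mat then "QUERY_5"
    else if has_met && has_mat then "QUERY_6"
    else if has_thi then "QUERY_1"
    else if has_met then "QUERY_2"
    else if has_mat then "QUERY_3"
    else "OTHER"

-- ===== PORT B =====
def pvIntentTable : List String :=
  ["OTHER", "QUERY_3", "QUERY_2", "QUERY_6", "QUERY_1", "QUERY_5", "QUERY_4", "QUERY_7"]

def determine_single_welding_intent_alt (slots : List (List String)) : String :=
  let tags : PySem.Set String :=
    PySem.Set.ofList (slots.map (fun slot => (PySem.List.pyGet? slot 0).getD ""))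
  let code : Int :=
    4 * (if PySem.Set.contains tags "THI" then 1 else 0)
      + 2 * (if PySem.Set.contains tags "MET" then 1 else 0)
      + (if PySem.Set.contains tags "MAT" then 1 else 0)
  (PySem.List.pyGet? pvIntentTable code).getD ""

-- ===== PRECONDITION & SPEC =====
-- Pre_ excludes slots containing an empty inner list: there slot[0] raises IndexError in A (and in B).
def Pre_determine_single_welding_intent (slots : List (List String)) : Prop :=
  ∀ slot ∈ slots, slot ≠ []
instance (slots : List (List String)) : Decidable (Pre_determine_single_welding_intent slots) := by unfold Pre_determine_single_welding_intent; infer_instance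
def pvWitness_determine_single_welding_intent : List (List String) := [["THI", "3mm"], ["MAT", "steel"]]

def Spec_determine_single_welding_intent (slots : List (List String)) (out : String) : Prop := out = determine_single_welding_intent_alt slots
instance (slots : List (List String)) (out : String) : Decidable (Spec_determine_single_welding_intent slots out) := by unfold Spec_determine_single_welding_intent; infer_instance

-- ===== CLAIM (what is proved, stated in full; the proofs are below) =====
def Claim_equal_determine_single_welding_intent : Prop := ∀ (slots : List (List String)), Dom_determine_single_welding_intent slots → Pre_determine_single_welding_intent slots → Spec_determine_single_welding_intent slots (determine_single_welding_intent slots)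

-- ===== LEMMAS AND PROOFS =====
theorem detA_flags_eq (slots : List (List String)) (t m a : Bool) :
    detA_flags slots (t, m, a) =
      (t || decide ("THI" ∈ slots.map (fun slot => (PySem.List.pyGet? slot 0).getD "")),
       m || decide ("MET" ∈ slots.map (fun slot => (PySem.List.pyGet? slot 0).getD "")),
       a || decide ("MAT" ∈ slots.map (fun slot => (PySem.List.pyGet? slot 0).getD ""))) := by
  induction slots generalizing t m a with
  | nil => simp [detA_flags]
  | cons slot rest ih =>
    simp only [detA_flags, beq_iff_eq]
    by_cases hthi : ((PySem.List.pyGet? slot 0).getD "") = "THI"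
    · simp [hthi, ih]
    · by_cases hmet : ((PySem.List.pyGet? slot 0).getD "") = "MET"
      · simp [hmet, ih]
      · by_cases hmat : ((PySem.List.pyGet? slot 0).getD "") = "MAT"
        · simp [hmat, ih]
        · simp [hthi, hmet, hmat, Ne.symm hthi, Ne.symm hmet, Ne.symm hmat, ih]

theorem contains_ofList_eq (xs : List String) (x : String) :
    PySem.Set.contains (PySem.Set.ofList xs) x = decide (x ∈ xs) := by
  by_cases h : x ∈ xs <;>
    simp [PySem.Set.mem_ofList, h]

-- ===== VERDICT (by name: the statement is the Claim_ definition above) =====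
theorem determine_single_welding_intent_spec : Claim_equal_determine_single_welding_intent := by
  intro slots _ _
  unfold Spec_determine_single_welding_intent determine_single_welding_intent
    determine_single_welding_intent_alt
  rw [detA_flags_eq]
  simp only [contains_ofList_eq]
  generalize decide ("THI" ∈ slots.map (fun slot => (PySem.List.pyGet? slot 0).getD "")) = b1
  generalize decide ("MET" ∈ slots.map (fun slot => (PySem.List.pyGet? slot 0).getD "")) = b2
  generalize decide ("MAT" ∈ slots.map (fun slot => (PySem.List.pyGet? slot 0).getD "")) = b3
  cases b1 <;> cases b2 <;> cases b3 <;> rfl
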